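-- pv_equiv track=rewrite | github.com/githubTB/jn_rag | extractor/excel_extractor.py | _is_sparse_auxiliary_row
-- ===== SOURCE A (Python) =====
-- def _is_sparse_auxiliary_row(row_values: dict[int, str], col_map: dict[int, str]) -> bool:
--     if not col_map:
--         return False
--     ordered_cols = sorted(col_map.keys())
--     if len(ordered_cols) < 2:
--         return False
--
--     first_col = ordered_cols[0]
--     first_val = (row_values.get(first_col) or "").strip()
--     if first_val:
--         return False
--
--     non_key_non_empty = [
--         (c, (row_values.get(c) or "").strip())
--         for c in ordered_cols[1:]
--         if (row_values.get(c) or "").strip()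
--     ]
--     return len(non_key_non_empty) == 1
-- ===== SOURCE B (Python) =====
-- def _is_sparse_auxiliary_row(row_values: dict[int, str], col_map: dict[int, str]) -> bool:
--     # Single streaming pass: track the running minimum key and count non-blank
--     # values over ALL keys at once.  A blank minimum contributes 0 to the total,
--     # so "exactly one non-blank among the non-minimum keys" is simply total == 1.
--     m = None
--     total = 0
--     for c in col_map:
--         if m is None or c < m:
--             m = c
--         if (row_values.get(c) or "").strip():
--             total += 1
--     if m is None or len(col_map) < 2:
--         return False
--     return total == 1 and not (row_values.get(m) or "").strip()
-- ===== Notes on version B (the rewrite author's own statement) =====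
-- stated objective: alternative
-- what changed: replaces sort-then-slice plus a filtering list comprehension over the non-first columns with one streaming pass that simultaneously maintains the running minimum key and a non-blank count over all keys, deciding at the end via the invariant that a blank minimum contributes nothing to the count
import Mathlib
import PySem

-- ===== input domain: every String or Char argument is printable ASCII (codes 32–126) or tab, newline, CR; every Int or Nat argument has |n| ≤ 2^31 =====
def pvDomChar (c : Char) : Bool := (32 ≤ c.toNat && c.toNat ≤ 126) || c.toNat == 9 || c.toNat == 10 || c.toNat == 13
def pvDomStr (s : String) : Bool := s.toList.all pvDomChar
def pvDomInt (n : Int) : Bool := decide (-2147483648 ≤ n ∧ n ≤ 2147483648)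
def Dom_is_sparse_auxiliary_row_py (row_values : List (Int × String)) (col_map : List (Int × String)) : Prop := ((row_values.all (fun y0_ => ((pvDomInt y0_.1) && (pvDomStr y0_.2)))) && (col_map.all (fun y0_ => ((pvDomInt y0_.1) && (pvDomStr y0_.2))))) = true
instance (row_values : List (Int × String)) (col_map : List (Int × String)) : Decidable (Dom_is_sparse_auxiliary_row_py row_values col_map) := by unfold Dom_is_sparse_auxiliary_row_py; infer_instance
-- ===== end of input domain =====

-- B replaces A's sort-then-slice plus filtering comprehension by ONE streaming pass that
-- maintains the running minimum key and a non-blank count over all keys (objective: alternative).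

-- ===== PORT A =====
def is_sparse_auxiliary_row_py (row_values : List (Int × String)) (col_map : List (Int × String)) : Bool :=
  let row := PySem.Dict.ofList row_values
  let col := PySem.Dict.ofList col_map
  if col.size = 0 then false
  else
    let ordered_cols := PySem.List.sorted col.keys (fun x => x) false
    if ordered_cols.length < 2 then false
    else
      match ordered_cols with
      | [] => false  -- unreachable: length ≥ 2
      | first_col :: rest =>
        let first_val := PySem.Str.strip (row.getD first_col "")
        if first_val != "" then false
        else
          let non_key_non_empty :=
            (rest.filter (fun c => PySem.Str.strip (row.getD c "") != "")).map
              (fun c => (c, PySem.Str.strip (row.getD c "")))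
          non_key_non_empty.length = 1

-- ===== PORT B =====
-- Source B's single loop: running minimum key and non-blank count over all keys, in one state
def pvAltScan (row : PySem.Dict Int String) : List Int → Option Int × Int → Option Int × Int
  | [], st => st
  | c :: rest, (m, total) =>
    let m' : Option Int :=
      match m with
      | none => some c
      | some v => if c < v then some c else some v
    let total' := if PySem.Str.strip (row.getD c "") != "" then total + 1 else total
    pvAltScan row rest (m', total')

def is_sparse_auxiliary_row_py_alt (row_values : List (Int × String)) (col_map : List (Int × String)) : Bool :=
  let row := PySem.Dict.ofList row_values
  let col := PySem.Dict.ofList col_map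
  let st := pvAltScan row col.keys (none, 0)
  match st.1 with
  | none => false
  | some m =>
    if col.size < 2 then false
    else (st.2 == 1) && (PySem.Str.strip (row.getD m "") == "")

-- ===== PRECONDITION & SPEC =====
def Spec_is_sparse_auxiliary_row_py (row_values : List (Int × String)) (col_map : List (Int × String)) (out : Bool) : Prop := out = is_sparse_auxiliary_row_py_alt row_values col_map
instance (row_values : List (Int × String)) (col_map : List (Int × String)) (out : Bool) : Decidable (Spec_is_sparse_auxiliary_row_py row_values col_map out) := by unfold Spec_is_sparse_auxiliary_row_py; infer_instance

-- ===== CLAIM (what is proved, stated in full; the proofs are below) =====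
def Claim_equal_is_sparse_auxiliary_row_py : Prop := ∀ (row_values : List (Int × String)) (col_map : List (Int × String)), Dom_is_sparse_auxiliary_row_py row_values col_map → Spec_is_sparse_auxiliary_row_py row_values col_map (is_sparse_auxiliary_row_py row_values col_map)

-- ===== LEMMAS AND PROOFS =====

-- the second component of B's scan counts the non-blank values over the whole list
lemma pvAltScan_snd (row : PySem.Dict Int String) (l : List Int) (m : Option Int) (t : Int) :
    (pvAltScan row l (m, t)).2
      = t + ((l.countP (fun c => PySem.Str.strip (row.getD c "") != "")) : Int) := by
  induction l generalizing m t with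
  | nil => simp [pvAltScan]
  | cons c rest ih =>
    by_cases hp : (PySem.Str.strip (row.getD c "") != "") = true
    · simp only [pvAltScan, hp, List.countP_cons, if_true]
      rw [ih]
      push_cast
      ring
    · simp only [pvAltScan, List.countP_cons, hp]
      rw [if_neg (by simp), ih]
      simp

-- the first component of B's scan is the running minimum
lemma pvAltScan_fst_some (row : PySem.Dict Int String) (l : List Int) (v : Int) (t : Int) :
    (pvAltScan row l (some v, t)).1 = some (l.foldl min v) := by
  induction l generalizing v t with
  | nil => simp [pvAltScan]
  | cons c rest ih =>
    simp only [pvAltScan, List.foldl_cons]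
    by_cases hc : c < v
    · rw [if_pos hc]
      have : min v c = c := by omega
      rw [this]
      exact ih c _
    · rw [if_neg hc]
      have : min v c = v := by omega
      rw [this]
      exact ih v _

-- ===== VERDICT (by name: the statement is the Claim_ definition above) =====
theorem is_sparse_auxiliary_row_py_spec : Claim_equal_is_sparse_auxiliary_row_py := by
  intro row_values col_map _
  unfold Spec_is_sparse_auxiliary_row_py is_sparse_auxiliary_row_py is_sparse_auxiliary_row_py_alt
  dsimp only
  set row := PySem.Dict.ofList row_values with hrow
  set col := PySem.Dict.ofList col_map with hcol
  have hlenkeys : col.keys.length = col.size := by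
    simp [PySem.Dict.keys, PySem.Dict.size]
  have hlensorted : (PySem.List.sorted col.keys (fun x => x) false).length = col.keys.length :=
    PySem.List.length_sorted _ _ _
  by_cases hsz : col.size < 2
  · -- both guards fire: both sides are false
    rcases (by omega : col.size = 0 ∨ col.size = 1) with h0 | h1
    · have hk : col.keys = [] := by
        cases h : col.keys with
        | nil => rfl
        | cons a t => rw [h] at hlenkeys; simp at hlenkeys; omega
      simp [h0, hk, pvAltScan]
    · have hk : ∃ a, col.keys = [a] := by
        cases h : col.keys with
        | nil => rw [h] at hlenkeys; simp at hlenkeys; omega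
        | cons a t =>
          cases t with
          | nil => exact ⟨a, rfl⟩
          | cons b t' => rw [h] at hlenkeys; simp at hlenkeys; omega
      obtain ⟨a, hk⟩ := hk
      simp [h1, hk, pvAltScan]
  · have hne0 : ¬ col.size = 0 := by omega
    have hlen2 : ¬ (PySem.List.sorted col.keys (fun x => x) false).length < 2 := by
      rw [hlensorted, hlenkeys]; omega
    obtain ⟨first_col, rest, hs⟩ :
        ∃ a t, PySem.List.sorted col.keys (fun x => x) false = a :: t := by
      cases h : PySem.List.sorted col.keys (fun x => x) false with
      | nil => exact absurd (by rw [h]; simp) hlen2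
      | cons a t => exact ⟨a, t, rfl⟩
    -- keys is nonempty
    obtain ⟨k, ks, hkeys⟩ : ∃ a t, col.keys = a :: t := by
      cases h : col.keys with
      | nil =>
        rw [h] at hlenkeys; simp at hlenkeys; omega
      | cons a t => exact ⟨a, t, rfl⟩
    -- B's running minimum
    have hscan1 : (pvAltScan row col.keys (none, 0)).1 = some (ks.foldl min k) := by
      rw [hkeys]; simp only [pvAltScan]; exact pvAltScan_fst_some row ks k _
    set mB := ks.foldl min k with hmB
    -- mB equals A's first_col: both are THE minimum of keys
    have hmin? : PySem.List.min? col.keys (fun x => x) = some mB := by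
      rw [hkeys, hmB]; exact PySem.List.min?_id_cons (x := k) (t := ks)
    have hfmem : first_col ∈ col.keys := by
      have : first_col ∈ PySem.List.sorted col.keys (fun x => x) false := by rw [hs]; simp
      rwa [PySem.List.mem_sorted] at this
    have hmeq : mB = first_col := by
      have h1 : mB ≤ first_col := PySem.List.min?_isMin hmin? first_col hfmem
      have h2 : first_col ≤ mB :=
        PySem.List.key_head_sorted_le col.keys (fun x => x) hs mB (PySem.List.min?_mem hmin?)
      omega
    rw [if_neg hne0, if_neg hlen2, hs, hscan1, hmeq]
    dsimp only
    rw [if_neg hsz]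
    -- counts: B counts over all keys, A filters over rest of the sorted list
    have hperm : (first_col :: rest).Perm col.keys :=
      hs ▸ PySem.List.sorted_perm col.keys (fun x => x) false
    have hscan2 : (pvAltScan row col.keys (none, 0)).2
        = ((col.keys.countP (fun c => PySem.Str.strip (row.getD c "") != "")) : Int) := by
      rw [pvAltScan_snd]; ring
    by_cases hfv : (PySem.Str.strip (row.getD first_col "") != "") = true
    · -- first value non-blank: A returns early, B's last conjunct is false
      have hb : (PySem.Str.strip (row.getD first_col "") == "") = false := by
        simpa using hfv
      simp [hfv, hb]
    · have hfv' : PySem.Str.strip (row.getD first_col "") = "" := by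
        simpa using hfv
      have hcount : col.keys.countP (fun c => PySem.Str.strip (row.getD c "") != "")
          = (rest.filter (fun c => PySem.Str.strip (row.getD c "") != "")).length := by
        rw [← hperm.countP_eq, List.countP_cons]
        simp [hfv', List.countP_eq_length_filter]
      rw [if_neg hfv, hscan2, hcount]
      simp [hfv']
      rw [Bool.eq_iff_iff]
      simp
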